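-- pv_equiv track=rewrite | github.com/rotemlv/ProbabilityTests | anotherAnotherp.py | hire_k_candidates_out_of_n_single_hire
-- ===== SOURCE A (Python) =====
-- def my_better_than_min(arr, element, k):
--     if len(arr) < k:
--         return True
--     return element > min(arr)
--
-- def hire_k_candidates_out_of_n_single_hire(candidates, k, candidate_to_check):
--     # this function receives a permutation of the sorted candidates
--     # traverses the array and decides who to hire based on skill (number of candidate)
--     hired_candidates = []
--     for candidate in candidates:
--         if my_better_than_min(hired_candidates, candidate, k):
--             # candidate "i" was chosen
--             if candidate == candidate_to_check:
--                 return True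
--             # if necessary, remove the lowest hire from the list
--             if len(hired_candidates) == k:
--                 hired_candidates.remove(min(hired_candidates))
--             hired_candidates.append(candidate)
--     return False
-- ===== SOURCE B (Python) =====
-- def hire_k_candidates_out_of_n_single_hire(candidates, k, candidate_to_check):
--     # One O(n) pass: the target is hired iff, at its first occurrence,
--     # fewer than k earlier candidates are >= it.
--     count = 0
--     for x in candidates:
--         if x == candidate_to_check:
--             return count < k
--         if x >= candidate_to_check:
--             count += 1
--     return False
-- ===== Notes on version B (the rewrite author's own statement) =====
-- stated objective: faster
-- what changed: Replaced the simulated top-k hired list (min/remove on a k-sized list per step) by a single counting scan: the target is hired iff fewer than k earlier elements are >= it at its first occurrence.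
import Mathlib
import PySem

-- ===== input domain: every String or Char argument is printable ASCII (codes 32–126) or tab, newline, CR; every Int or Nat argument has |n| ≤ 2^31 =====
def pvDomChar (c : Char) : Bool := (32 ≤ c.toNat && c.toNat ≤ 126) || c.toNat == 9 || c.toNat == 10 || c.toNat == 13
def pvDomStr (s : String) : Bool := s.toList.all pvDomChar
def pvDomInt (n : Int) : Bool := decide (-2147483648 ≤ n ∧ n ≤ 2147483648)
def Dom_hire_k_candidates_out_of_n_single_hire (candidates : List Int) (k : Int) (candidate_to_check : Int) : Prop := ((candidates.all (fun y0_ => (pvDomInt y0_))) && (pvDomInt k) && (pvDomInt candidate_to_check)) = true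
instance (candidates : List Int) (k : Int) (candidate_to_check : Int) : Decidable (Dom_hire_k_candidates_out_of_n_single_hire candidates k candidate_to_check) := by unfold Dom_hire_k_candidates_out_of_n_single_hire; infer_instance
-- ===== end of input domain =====

-- B replaces A's simulated top-k hired list by a single counting scan (faster; asymptotic mechanism: O(n) vs O(n*k)).
-- ===== PORT A =====
def my_better_than_min (arr : List Int) (element : Int) (k : Int) : Bool :=
  if (arr.length : Int) < k then true
  -- min(arr) raises ValueError on empty arr in Python; .getD 0 is only reached outside Pre_
  else decide (element > (PySem.List.min? arr (fun y => y)).getD 0)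

def hireLoopA (k c : Int) : List Int → List Int → Bool
  | _, [] => false
  | hired, x :: rest =>
    if my_better_than_min hired x k then
      if x = c then true
      else
        hireLoopA k c
          (if (hired.length : Int) = k then
            ((PySem.List.remove? hired ((PySem.List.min? hired (fun y => y)).getD 0)).getD hired) ++ [x]
          else hired ++ [x]) rest
    else hireLoopA k c hired rest

def hire_k_candidates_out_of_n_single_hire (candidates : List Int) (k : Int) (candidate_to_check : Int) : Bool :=
  hireLoopA k candidate_to_check [] candidates

-- ===== PORT B =====
def hireLoopB (k c : Int) : Int → List Int → Bool
  | _, [] => false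
  | count, x :: rest =>
    if x = c then decide (count < k)
    else hireLoopB k c (if c ≤ x then count + 1 else count) rest

def hire_k_candidates_out_of_n_single_hire_alt (candidates : List Int) (k : Int) (candidate_to_check : Int) : Bool :=
  hireLoopB k candidate_to_check 0 candidates

-- ===== PRECONDITION & SPEC =====
-- Pre_ excludes exactly the inputs where A raises: nonempty candidates with k <= 0
-- (A calls min([]) on the empty hired list there, ValueError).
def Pre_hire_k_candidates_out_of_n_single_hire (candidates : List Int) (k : Int) (candidate_to_check : Int) : Prop :=
  candidates = [] ∨ 1 ≤ k
instance (candidates : List Int) (k : Int) (candidate_to_check : Int) : Decidable (Pre_hire_k_candidates_out_of_n_single_hire candidates k candidate_to_check) := by unfold Pre_hire_k_candidates_out_of_n_single_hire; infer_instance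

def pvWitness_hire_k_candidates_out_of_n_single_hire : List Int × Int × Int := ([3, 1, 2], 2, 2)

def Spec_hire_k_candidates_out_of_n_single_hire (candidates : List Int) (k : Int) (candidate_to_check : Int) (out : Bool) : Prop := out = hire_k_candidates_out_of_n_single_hire_alt candidates k candidate_to_check
instance (candidates : List Int) (k : Int) (candidate_to_check : Int) (out : Bool) : Decidable (Spec_hire_k_candidates_out_of_n_single_hire candidates k candidate_to_check out) := by unfold Spec_hire_k_candidates_out_of_n_single_hire; infer_instance

-- ===== CLAIM (what is proved, stated in full; the proofs are below) =====
def Claim_equal_hire_k_candidates_out_of_n_single_hire : Prop := ∀ (candidates : List Int) (k : Int) (candidate_to_check : Int), Dom_hire_k_candidates_out_of_n_single_hire candidates k candidate_to_check → Pre_hire_k_candidates_out_of_n_single_hire candidates k candidate_to_check → Spec_hire_k_candidates_out_of_n_single_hire candidates k candidate_to_check (hire_k_candidates_out_of_n_single_hire candidates k candidate_to_check)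

-- ===== LEMMAS AND PROOFS =====

-- Number of elements of l that are >= c (as an Int).
def cntGE (c : Int) (l : List Int) : Int := ((l.filter (fun y => decide (c ≤ y))).length : Int)

-- The loop invariant tying A's hired list to B's counter: the hired list holds
-- exactly min(count, k) elements that are >= c, and never more than k elements.
def LoopInv (k c : Int) (hired : List Int) (count : Int) : Prop :=
  1 ≤ k ∧ 0 ≤ count ∧ cntGE c hired = min count k ∧ (hired.length : Int) ≤ k

lemma min_facts {hired : List Int} (h : hired ≠ []) :
    (PySem.List.min? hired (fun y => y)).getD 0 ∈ hired ∧
    ∀ y ∈ hired, (PySem.List.min? hired (fun y => y)).getD 0 ≤ y := by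
  cases hm : PySem.List.min? hired (fun y => y) with
  | none => exact absurd ((PySem.List.min?_eq_none_iff _ _).mp hm) h
  | some m =>
    simp only [Option.getD_some]
    exact ⟨PySem.List.min?_mem hm, fun y hy => PySem.List.min?_isMin hm y hy⟩

lemma cntGE_nonneg (c : Int) (l : List Int) : 0 ≤ cntGE c l := by
  simp [cntGE]

lemma cntGE_le_len (c : Int) (l : List Int) : cntGE c l ≤ (l.length : Int) := by
  simp only [cntGE, Int.ofNat_le]
  exact_mod_cast l.length_filter_le _

lemma cntGE_append (c : Int) (l : List Int) (x : Int) :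
    cntGE c (l ++ [x]) = cntGE c l + (if c ≤ x then 1 else 0) := by
  simp only [cntGE, List.filter_append, List.length_append]
  by_cases h : c ≤ x <;> simp [h]

lemma cntGE_eq_len_all {c : Int} {l : List Int} (h : cntGE c l = (l.length : Int)) :
    ∀ y ∈ l, c ≤ y := by
  have h' : (l.filter (fun y => decide (c ≤ y))).length = l.length := by
    simpa [cntGE] using h
  have := (List.length_filter_eq_length_iff).mp h'
  intro y hy; simpa using this y hy

lemma cntGE_lt_len_ex {c : Int} {l : List Int} (h : cntGE c l < (l.length : Int)) :
    ∃ y ∈ l, y < c := by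
  by_contra hc
  push_neg at hc
  have : l.filter (fun y => decide (c ≤ y)) = l :=
    List.filter_eq_self.mpr (fun y hy => by simpa using hc y hy)
  rw [cntGE, this] at h; omega

lemma cntGE_erase {c m : Int} {l : List Int} (hm : m ∈ l) :
    cntGE c (l.erase m) = cntGE c l - (if c ≤ m then 1 else 0) := by
  have hperm : List.Perm l (m :: l.erase m) := List.perm_cons_erase hm
  have := (hperm.filter (fun y => decide (c ≤ y))).length_eq
  simp only [List.filter_cons] at this
  unfold cntGE
  split <;> split_ifs at this <;> simp_all <;> omega

lemma len_erase {m : Int} {l : List Int} (hm : m ∈ l) :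
    ((l.erase m).length : Int) = (l.length : Int) - 1 := by
  have := (List.perm_cons_erase hm).length_eq
  simp at this; omega

-- The hiring test, rephrased via the invariant components.
lemma better_iff {k x : Int} {hired : List Int} (hk : 1 ≤ k) :
    my_better_than_min hired x k = true ↔
      ((hired.length : Int) < k ∨ (hired ≠ [] ∧ (PySem.List.min? hired (fun y => y)).getD 0 < x)) := by
  unfold my_better_than_min
  split_ifs with h
  · simp [h]
  · push_neg at h
    have hne : hired ≠ [] := by
      intro he; subst he; simp at h; omega
    simp [hne]
    omega

-- Under the invariant, A hires the target element c exactly when count < k.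
lemma better_target {k c : Int} {hired : List Int} {count : Int}
    (hinv : LoopInv k c hired count) :
    my_better_than_min hired c k = decide (count < k) := by
  obtain ⟨hk, hc0, hg, hl⟩ := hinv
  have hgn := cntGE_nonneg c hired
  have hgl := cntGE_le_len c hired
  by_cases hck : count < k
  · have hd : decide (count < k) = true := by simp [hck]
    rw [hd, better_iff hk]
    by_cases hlen : (hired.length : Int) < k
    · exact Or.inl hlen
    · right
      have hne : hired ≠ [] := by intro he; subst he; simp at hlen; omega
      obtain ⟨hmem, hmin⟩ := min_facts hne
      refine ⟨hne, ?_⟩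
      have hgc : cntGE c hired = count := by omega
      obtain ⟨y, hy, hyc⟩ := cntGE_lt_len_ex (by omega : cntGE c hired < (hired.length : Int))
      have := hmin y hy
      omega
  · have hd : decide (count < k) = false := by simp [hck]
    rw [hd]
    by_contra hb
    rw [Bool.not_eq_false, better_iff hk] at hb
    rcases hb with h | ⟨hne, hlt⟩
    · have hgk : cntGE c hired = k := by omega
      omega
    · obtain ⟨hmem, hmin⟩ := min_facts hne
      have hlk : (hired.length : Int) = k := by
        rcases lt_or_ge (hired.length : Int) k with h' | h'
        · -- impossible: then min count k <= cntGE... actually cntGE = min count k = k > length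
          have : cntGE c hired = k := by omega
          omega
        · omega
      have hall := cntGE_eq_len_all (by omega : cntGE c hired = (hired.length : Int))
      have := hall _ hmem
      omega

-- Invariant preservation when A skips an element (not hired).
lemma inv_skip {k c x : Int} {hired : List Int} {count : Int}
    (hinv : LoopInv k c hired count) (hb : my_better_than_min hired x k = false) :
    LoopInv k c hired (if c ≤ x then count + 1 else count) := by
  obtain ⟨hk, hc0, hg, hl⟩ := hinv
  have hno := (better_iff (x := x) (hired := hired) hk).not.mp (by rw [hb]; simp)
  push_neg at hno
  obtain ⟨hlk, hmin'⟩ := hno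
  have hne : hired ≠ [] := by intro he; subst he; simp at hlk; omega
  obtain ⟨hmem, hmin⟩ := min_facts hne
  have hxm : x ≤ (PySem.List.min? hired (fun y => y)).getD 0 := by have := hmin' hne; omega
  by_cases hcx : c ≤ x
  · have hall : ∀ y ∈ hired, c ≤ y := fun y hy => by have := hmin y hy; omega
    have hfe : hired.filter (fun y => decide (c ≤ y)) = hired :=
      List.filter_eq_self.mpr (fun y hy => by simpa using hall y hy)
    have hgk : cntGE c hired = (hired.length : Int) := by rw [cntGE, hfe]
    rw [if_pos hcx]
    exact ⟨hk, by omega, by omega, hl⟩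
  · rw [if_neg hcx]
    exact ⟨hk, hc0, hg, hl⟩

-- Invariant preservation when A hires an element.
lemma inv_hire {k c x : Int} {hired : List Int} {count : Int}
    (hinv : LoopInv k c hired count) (hb : my_better_than_min hired x k = true) :
    LoopInv k c
      (if (hired.length : Int) = k then
        ((PySem.List.remove? hired ((PySem.List.min? hired (fun y => y)).getD 0)).getD hired) ++ [x]
      else hired ++ [x])
      (if c ≤ x then count + 1 else count) := by
  obtain ⟨hk, hc0, hg, hl⟩ := hinv
  have hgn := cntGE_nonneg c hired
  have hgl := cntGE_le_len c hired
  by_cases hlen : (hired.length : Int) = k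
  · rw [if_pos hlen]
    have hne : hired ≠ [] := by
      intro he; subst he; simp at hlen
      rcases (better_iff hk).mp hb with h | ⟨hne, _⟩
      · omega
      · exact hne rfl
    obtain ⟨hmem, hmin⟩ := min_facts hne
    set m := (PySem.List.min? hired (fun y => y)).getD 0 with hmdef
    rw [PySem.List.remove?_eq_some_erase _ _ hmem, Option.getD_some]
    have hxm : m < x := by
      rcases (better_iff hk).mp hb with h | ⟨_, hlt⟩
      · omega
      · exact hlt
    have hlen' : (((hired.erase m) ++ [x]).length : Int) = k := by
      have := len_erase hmem
      simp only [List.length_append, List.length_cons, List.length_nil]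
      push_cast
      omega
    refine ⟨hk, by split <;> omega, ?_, by omega⟩
    rw [cntGE_append, cntGE_erase hmem]
    by_cases hck : count < k
    · have hgc : cntGE c hired = count := by omega
      obtain ⟨y, hy, hyc⟩ := cntGE_lt_len_ex (by omega : cntGE c hired < (hired.length : Int))
      have hmc : ¬ (c ≤ m) := by have := hmin y hy; omega
      simp only [if_neg hmc]
      split <;> omega
    · have hgk : cntGE c hired = k := by omega
      have hall := cntGE_eq_len_all (by omega : cntGE c hired = (hired.length : Int))
      have hmc : c ≤ m := hall _ hmem
      have hxc' : c ≤ x := by omega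
      simp only [if_pos hmc, if_pos hxc']
      omega
  · rw [if_neg hlen]
    have hlt : (hired.length : Int) < k := by omega
    have hck : count < k := by omega
    have hgc : cntGE c hired = count := by omega
    have hlen' : ((hired ++ [x]).length : Int) = (hired.length : Int) + 1 := by
      simp only [List.length_append, List.length_cons, List.length_nil]; push_cast; omega
    refine ⟨hk, by split <;> omega, ?_, by omega⟩
    rw [cntGE_append]
    split <;> omega

-- Once count >= k, no later occurrence of c can be hired, so A's loop ends in False.
lemma loopA_false (k c : Int) (rest : List Int) : ∀ (hired : List Int) (count : Int),
    LoopInv k c hired count → k ≤ count → hireLoopA k c hired rest = false := by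
  induction rest with
  | nil => intro hired count _ _; rfl
  | cons x rest ih =>
    intro hired count hinv hck
    by_cases hb : my_better_than_min hired x k = true
    · rw [hireLoopA, if_pos hb]
      by_cases hxc : x = c
      · exfalso
        subst hxc
        rw [better_target hinv] at hb
        simp at hb; omega
      · rw [if_neg hxc]
        exact ih _ _ (inv_hire hinv hb) (by split <;> omega)
    · rw [hireLoopA, if_neg (by simpa using hb)]
      exact ih _ _ (inv_skip hinv (by simpa using hb)) (by split <;> omega)

-- Main loop lemma: under the invariant, the two loops agree.
lemma loop_eq (k c : Int) (rest : List Int) : ∀ (hired : List Int) (count : Int),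
    LoopInv k c hired count → hireLoopA k c hired rest = hireLoopB k c count rest := by
  induction rest with
  | nil => intro hired count _; rfl
  | cons x rest ih =>
    intro hired count hinv
    by_cases hxc : x = c
    · subst hxc
      rw [hireLoopB, if_pos rfl, hireLoopA, better_target hinv]
      by_cases hck : count < k
      · simp [hck]
      · have hd : decide (count < k) = false := by simpa using hck
        rw [hd, if_neg (by simp)]
        exact loopA_false k x rest hired count hinv (by omega)
    · rw [hireLoopB, if_neg hxc]
      by_cases hb : my_better_than_min hired x k = true
      · rw [hireLoopA, if_pos hb, if_neg hxc]
        exact ih _ _ (inv_hire hinv hb)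
      · rw [hireLoopA, if_neg (by simpa using hb)]
        exact ih _ _ (inv_skip hinv (by simpa using hb))

-- ===== VERDICT (by name: the statement is the Claim_ definition above) =====
theorem hire_k_candidates_out_of_n_single_hire_spec : Claim_equal_hire_k_candidates_out_of_n_single_hire := by
  intro candidates k c _ hpre
  unfold Spec_hire_k_candidates_out_of_n_single_hire
  unfold hire_k_candidates_out_of_n_single_hire hire_k_candidates_out_of_n_single_hire_alt
  rcases hpre with h | h
  · subst h; rfl
  · exact loop_eq k c candidates [] 0 ⟨h, le_refl 0, by simp [cntGE]; omega, by simp; omega⟩
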